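-- pv_equiv track=rewrite | github.com/alekshnl/QvfMetadataExtractor | scripts/extract_qvf.py | compute_table_status
-- ===== SOURCE A (Python) =====
-- from typing import Any
--
-- def compute_table_status(confidence: dict[str, dict[str, Any]]) -> str:
--     if not confidence:
--         return "exact"
--     statuses = {item["status"] for item in confidence.values()} if confidence else {"missing"}
--     if statuses == {"exact"}:
--         return "exact"
--     if statuses == {"heuristic"}:
--         return "heuristic"
--     if "partial" in statuses or ("missing" in statuses and len(statuses) > 1):
--         return "partial"
--     if "heuristic" in statuses and len(statuses) > 1:
--         return "partial"
--     if statuses == {"missing"}: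
--         return "missing"
--     return "partial"
-- ===== SOURCE B (Python) =====
-- def compute_table_status(confidence: dict) -> str:
--     if not confidence:
--         return "exact"
--     all_exact = True
--     all_heuristic = True
--     all_missing = True
--     for item in confidence.values():
--         s = item["status"]
--         if s != "exact":
--             all_exact = False
--         if s != "heuristic":
--             all_heuristic = False
--         if s != "missing":
--             all_missing = False
--     if all_exact:
--         return "exact"
--     if all_heuristic:
--         return "heuristic"
--     if all_missing:
--         return "missing"
--     return "partial"
-- ===== Notes on version B (the rewrite author's own statement) =====
-- stated objective: simpler
-- what changed: Replaces the build-a-set-then-compare-to-singletons cascade (six branch tests over a deduplicated set) by a single fold maintaining three all_* flags, with one four-line return chain.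
import Mathlib
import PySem

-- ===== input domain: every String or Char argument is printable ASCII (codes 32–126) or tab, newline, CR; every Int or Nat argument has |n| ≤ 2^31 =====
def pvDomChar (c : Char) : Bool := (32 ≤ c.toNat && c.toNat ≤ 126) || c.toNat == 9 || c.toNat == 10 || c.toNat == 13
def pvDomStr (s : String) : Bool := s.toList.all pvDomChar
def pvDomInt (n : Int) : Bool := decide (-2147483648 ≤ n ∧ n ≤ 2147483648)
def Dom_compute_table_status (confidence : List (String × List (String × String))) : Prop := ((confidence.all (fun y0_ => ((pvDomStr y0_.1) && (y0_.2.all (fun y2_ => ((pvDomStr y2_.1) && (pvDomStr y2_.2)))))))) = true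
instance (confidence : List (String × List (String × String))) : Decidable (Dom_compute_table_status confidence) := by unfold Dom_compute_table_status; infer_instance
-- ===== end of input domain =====

-- B replaces A's build-a-set-then-compare-to-singletons cascade by a single fold
-- maintaining three all_* flags and a short return chain (objective: simpler).

-- ===== PORT A =====
-- item["status"] on the inner dict (assoc list, first match); total form used under Pre_
def pvStatusOf (item : List (String × String)) : String :=
  ((PySem.Dict.mk item).get? "status").getD ""

def compute_table_status (confidence : List (String × List (String × String))) : String :=
  if confidence = [] then "exact"
  else
    let statuses : PySem.Set String :=
      if confidence ≠ [] then PySem.Set.ofList (confidence.map (fun p => pvStatusOf p.2))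
      else ["missing"]
    if PySem.Set.equal statuses (PySem.Set.ofList ["exact"]) then "exact"
    else if PySem.Set.equal statuses (PySem.Set.ofList ["heuristic"]) then "heuristic"
    else if PySem.Set.contains statuses "partial" ||
            (PySem.Set.contains statuses "missing" && decide (1 < PySem.Set.len statuses)) then "partial"
    else if PySem.Set.contains statuses "heuristic" && decide (1 < PySem.Set.len statuses) then "partial"
    else if PySem.Set.equal statuses (PySem.Set.ofList ["missing"]) then "missing"
    else "partial"

-- ===== PORT B =====
def compute_table_status_alt (confidence : List (String × List (String × String))) : String :=
  if confidence = [] then "exact"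
  else
    let flags : Bool × Bool × Bool :=
      confidence.foldl
        (fun (st : Bool × Bool × Bool) p =>
          let s := pvStatusOf p.2
          ((if s ≠ "exact" then false else st.1),
           (if s ≠ "heuristic" then false else st.2.1),
           (if s ≠ "missing" then false else st.2.2)))
        (true, true, true)
    if flags.1 then "exact"
    else if flags.2.1 then "heuristic"
    else if flags.2.2 then "missing"
    else "partial"

-- ===== PRECONDITION & SPEC =====
-- Pre_ excludes exactly the inputs where some column entry lacks a "status" key:
-- there Python A (and B) raise KeyError.
def Pre_compute_table_status (confidence : List (String × List (String × String))) : Prop :=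
  ∀ p ∈ confidence, "status" ∈ p.2.map Prod.fst
instance (confidence : List (String × List (String × String))) : Decidable (Pre_compute_table_status confidence) := by unfold Pre_compute_table_status; infer_instance

def pvWitness_compute_table_status : (List (String × List (String × String))) :=
  [("col1", [("status", "exact")]), ("col2", [("status", "heuristic")])]

def Spec_compute_table_status (confidence : List (String × List (String × String))) (out : String) : Prop := out = compute_table_status_alt confidence
instance (confidence : List (String × List (String × String))) (out : String) : Decidable (Spec_compute_table_status confidence out) := by unfold Spec_compute_table_status; infer_instance

-- ===== CLAIM (what is proved, stated in full; the proofs are below) =====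
def Claim_equal_compute_table_status : Prop := ∀ (confidence : List (String × List (String × String))), Dom_compute_table_status confidence → Pre_compute_table_status confidence → Spec_compute_table_status confidence (compute_table_status confidence)

-- ===== LEMMAS AND PROOFS =====

-- the fold of B computes the three "all equal" flags
theorem pv_foldl_flags (l : List (String × List (String × String))) (a b c : Bool) :
    l.foldl
      (fun (st : Bool × Bool × Bool) p =>
        let s := pvStatusOf p.2
        ((if s ≠ "exact" then false else st.1),
         (if s ≠ "heuristic" then false else st.2.1),
         (if s ≠ "missing" then false else st.2.2)))
      (a, b, c)
    = (a && l.all (fun p => pvStatusOf p.2 == "exact"),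
       b && l.all (fun p => pvStatusOf p.2 == "heuristic"),
       c && l.all (fun p => pvStatusOf p.2 == "missing")) := by
  induction l generalizing a b c with
  | nil => simp
  | cons x xs ih =>
      simp only [List.foldl_cons, List.all_cons, ih]
      by_cases h1 : pvStatusOf x.2 = "exact" <;>
        by_cases h2 : pvStatusOf x.2 = "heuristic" <;>
        by_cases h3 : pvStatusOf x.2 = "missing" <;>
        simp [h1, h2, h3]

-- a nonempty list all of whose deduplicated members equal x deduplicates to [x]
theorem pv_ofList_eq_singleton {vals : List String} {x : String}
    (hne : vals ≠ []) (hall : ∀ v ∈ vals, v = x) :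
    PySem.Set.ofList vals = [x] := by
  have hnd : (PySem.Set.ofList vals).Nodup := PySem.Set.nodup_ofList vals
  have hmem : ∀ v ∈ PySem.Set.ofList vals, v = x := by
    intro v hv
    exact hall v ((PySem.Set.mem_ofList _ _).1 hv)
  have hxs : x ∈ PySem.Set.ofList vals := by
    cases vals with
    | nil => exact absurd rfl hne
    | cons y ys =>
        have hy : y ∈ PySem.Set.ofList (y :: ys) := (PySem.Set.mem_ofList _ _).2 (by simp)
        have hx := hall y (by simp)
        subst hx
        exact hy
  cases hset : PySem.Set.ofList vals with
  | nil => rw [hset] at hxs; cases hxs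
  | cons a t =>
      rw [hset] at hmem hnd
      have ha : a = x := hmem a (by simp)
      cases t with
      | nil => simp [ha]
      | cons b t' =>
          have hb : b = x := hmem b (by simp)
          simp [ha, hb] at hnd

-- set-equality with a singleton is the "all equal" test, for nonempty vals
theorem pv_equal_singleton (vals : List String) (x : String) (hne : vals ≠ []) :
    PySem.Set.equal (PySem.Set.ofList vals) (PySem.Set.ofList [x])
      = vals.all (fun v => v == x) := by
  rw [Bool.eq_iff_iff, PySem.Set.equal_iff, List.all_eq_true]
  constructor
  · intro h v hv
    have := (h v).1 ((PySem.Set.mem_ofList _ _).2 hv)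
    simp [PySem.Set.ofList] at this
    simpa using this
  · intro h y
    have hx : x ∈ vals := by
      cases vals with
      | nil => exact absurd rfl hne
      | cons a t =>
          have := h a (by simp)
          simp at this
          rw [← this]; simp
    constructor
    · intro hy
      have := h y ((PySem.Set.mem_ofList _ _).1 hy)
      simp at this
      simp [PySem.Set.ofList, this]
    · intro hy
      simp [PySem.Set.ofList] at hy
      exact (PySem.Set.mem_ofList _ _).2 (hy ▸ hx)

theorem pv_main (confidence : List (String × List (String × String))) :
    compute_table_status confidence = compute_table_status_alt confidence := by
  by_cases hnil : confidence = []
  · simp [compute_table_status, compute_table_status_alt, hnil]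
  · unfold compute_table_status compute_table_status_alt
    simp only [hnil, ne_eq, not_false_eq_true, if_pos, pv_foldl_flags,
      Bool.true_and]
    set vals := confidence.map (fun p => pvStatusOf p.2) with hvals
    have hvne : vals ≠ [] := by
      simp [hvals, hnil]
    have hall : ∀ x : String,
        vals.all (fun v => v == x) = confidence.all (fun p => pvStatusOf p.2 == x) := by
      intro x; simp [hvals, List.all_map, Function.comp_def]
    rw [pv_equal_singleton vals "exact" hvne, pv_equal_singleton vals "heuristic" hvne,
        hall "exact", hall "heuristic"]
    by_cases he : confidence.all (fun p => pvStatusOf p.2 == "exact")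
    · simp [he]
    · by_cases hh : confidence.all (fun p => pvStatusOf p.2 == "heuristic")
      · simp [he, hh]
      · by_cases hm : confidence.all (fun p => pvStatusOf p.2 == "missing")
        · -- every status is "missing": the set is exactly ["missing"]
          have hset : PySem.Set.ofList vals = ["missing"] := by
            apply pv_ofList_eq_singleton hvne
            intro v hv
            rw [hvals] at hv
            obtain ⟨p, hp, rfl⟩ := List.mem_map.1 hv
            have := (List.all_eq_true.1 hm) p hp
            simpa using this
          rw [hset]
          simp [he, hh, hm, PySem.Set.contains, PySem.Set.len, PySem.Set.equal,
            PySem.Set.issubset]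
        · -- none of the three: A's remaining branches all return "partial"
          have hne' : PySem.Set.equal (PySem.Set.ofList vals) (PySem.Set.ofList ["missing"])
              = false := by
            rw [pv_equal_singleton vals "missing" hvne, hall "missing"]
            exact Bool.eq_false_iff.2 hm
          simp only [he, hh, hm, if_false, Bool.false_eq_true]
          split_ifs <;> simp_all

-- ===== VERDICT (by name: the statement is the Claim_ definition above) =====
theorem compute_table_status_spec : Claim_equal_compute_table_status := by
  intro confidence _ _
  unfold Spec_compute_table_status
  exact pv_main confidence
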